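-- pv_equiv track=rewrite | github.com/brunogaier280/laboratioAlgoritimo2 | Exercícios aula-3/Exercício 04.py | find_largest_product
-- ===== SOURCE A (Python) =====
-- def find_largest_product(matrix):
--     n = len(matrix)
--     largest_product = 0
--
--     for messi in range(n):
--         for gol in range(n - 4):
--             product = matrix[messi][gol] * matrix[messi][gol+1] * matrix[messi][gol+2] * matrix[messi][gol+3] * matrix[messi][gol+4]
--             largest_product = max(largest_product, product)
--
--     for i in range(n - 4):
--         for j in range(n):
--             product = matrix[i][j] * matrix[i+1][j] * matrix[i+2][j] * matrix[i+3][j] * matrix[i+4][j]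
--             largest_product = max(largest_product, product)
--
--
--     for i in range(n - 4):
--         for j in range(n - 4):
--             product = matrix[i][j] * matrix[i+1][j+1] * matrix[i+2][j+2] * matrix[i+3][j+3] * matrix[i+4][j+4]
--             largest_product = max(largest_product, product)
--
--     return largest_product
-- ===== SOURCE B (Python) =====
-- def find_largest_product(matrix):
--     n = len(matrix)
--     if n < 5:
--         return 0
--     # every line of the n x n grid that can contain a window of 5 consecutive cells:
--     # rows, columns, and down-right diagonals starting on the left or top edge
--     lines = [[matrix[i][j] for j in range(n)] for i in range(n)]
--     lines += [[matrix[i][j] for i in range(n)] for j in range(n)]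
--     lines += [[matrix[i][i - d] for i in range(d, n)] for d in range(n)]
--     lines += [[matrix[j - d][j] for j in range(d, n)] for d in range(1, n)]
--     best = 0
--     for line in lines:
--         for k in range(len(line) - 4):
--             p = line[k] * line[k + 1] * line[k + 2] * line[k + 3] * line[k + 4]
--             best = max(best, p)
--     return best
-- ===== Notes on version B (the rewrite author's own statement) =====
-- stated objective: alternative
-- what changed: B replaces A's three separately-indexed double loops over (row,col) window starts by first materializing every scannable line of the n x n grid (rows, columns, down-right diagonals from the left/top edge) and then running a single generic 5-window max-product scan over each line, folded into a 0-seeded running maximum.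
import Mathlib
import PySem

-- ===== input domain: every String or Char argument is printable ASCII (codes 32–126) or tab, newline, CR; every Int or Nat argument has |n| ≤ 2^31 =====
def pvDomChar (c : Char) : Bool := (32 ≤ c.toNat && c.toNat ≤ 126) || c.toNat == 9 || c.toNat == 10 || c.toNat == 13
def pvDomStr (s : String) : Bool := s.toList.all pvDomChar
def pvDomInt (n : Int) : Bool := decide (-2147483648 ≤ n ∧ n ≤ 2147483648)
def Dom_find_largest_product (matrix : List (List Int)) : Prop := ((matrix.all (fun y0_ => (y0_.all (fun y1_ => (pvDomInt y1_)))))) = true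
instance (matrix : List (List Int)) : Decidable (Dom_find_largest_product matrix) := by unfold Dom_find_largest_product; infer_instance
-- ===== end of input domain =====

-- B rebuilds the result by scanning every line (rows, columns, down-right diagonals) of the
-- n x n grid with one generic 5-window max-product helper instead of A's three separately
-- indexed double loops (objective: alternative decomposition, same cost).


-- ===== PORT A =====
def find_largest_product (matrix : List (List Int)) : Int :=
  let n : Int := matrix.length
  let largest_product : Int := 0
  let largest_product : Int :=
    (PySem.List.pyRange 0 n 1).foldl (fun lp messi =>
      (PySem.List.pyRange 0 (n - 4) 1).foldl (fun lp gol =>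
        max lp (PySem.List.pyGetD (PySem.List.pyGetD matrix messi []) gol 0 *
                PySem.List.pyGetD (PySem.List.pyGetD matrix messi []) (gol + 1) 0 *
                PySem.List.pyGetD (PySem.List.pyGetD matrix messi []) (gol + 2) 0 *
                PySem.List.pyGetD (PySem.List.pyGetD matrix messi []) (gol + 3) 0 *
                PySem.List.pyGetD (PySem.List.pyGetD matrix messi []) (gol + 4) 0)) lp) largest_product
  let largest_product : Int :=
    (PySem.List.pyRange 0 (n - 4) 1).foldl (fun lp i =>
      (PySem.List.pyRange 0 n 1).foldl (fun lp j =>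
        max lp (PySem.List.pyGetD (PySem.List.pyGetD matrix i []) j 0 *
                PySem.List.pyGetD (PySem.List.pyGetD matrix (i + 1) []) j 0 *
                PySem.List.pyGetD (PySem.List.pyGetD matrix (i + 2) []) j 0 *
                PySem.List.pyGetD (PySem.List.pyGetD matrix (i + 3) []) j 0 *
                PySem.List.pyGetD (PySem.List.pyGetD matrix (i + 4) []) j 0)) lp) largest_product
  let largest_product : Int :=
    (PySem.List.pyRange 0 (n - 4) 1).foldl (fun lp i =>
      (PySem.List.pyRange 0 (n - 4) 1).foldl (fun lp j =>
        max lp (PySem.List.pyGetD (PySem.List.pyGetD matrix i []) j 0 *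
                PySem.List.pyGetD (PySem.List.pyGetD matrix (i + 1) []) (j + 1) 0 *
                PySem.List.pyGetD (PySem.List.pyGetD matrix (i + 2) []) (j + 2) 0 *
                PySem.List.pyGetD (PySem.List.pyGetD matrix (i + 3) []) (j + 3) 0 *
                PySem.List.pyGetD (PySem.List.pyGetD matrix (i + 4) []) (j + 4) 0)) lp) largest_product
  largest_product

-- ===== PORT B =====
def find_largest_product_alt (matrix : List (List Int)) : Int :=
  let n : Int := matrix.length
  if n < 5 then 0
  else
    let rows := (PySem.List.pyRange 0 n 1).map (fun i =>
      (PySem.List.pyRange 0 n 1).map (fun j => PySem.List.pyGetD (PySem.List.pyGetD matrix i []) j 0))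
    let cols := (PySem.List.pyRange 0 n 1).map (fun j =>
      (PySem.List.pyRange 0 n 1).map (fun i => PySem.List.pyGetD (PySem.List.pyGetD matrix i []) j 0))
    let diags1 := (PySem.List.pyRange 0 n 1).map (fun d =>
      (PySem.List.pyRange d n 1).map (fun i => PySem.List.pyGetD (PySem.List.pyGetD matrix i []) (i - d) 0))
    let diags2 := (PySem.List.pyRange 1 n 1).map (fun d =>
      (PySem.List.pyRange d n 1).map (fun j => PySem.List.pyGetD (PySem.List.pyGetD matrix (j - d) []) j 0))
    let lines := rows ++ cols ++ diags1 ++ diags2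
    lines.foldl (fun best line =>
      (PySem.List.pyRange 0 ((line.length : Int) - 4) 1).foldl (fun acc k =>
        max acc (PySem.List.pyGetD line k 0 * PySem.List.pyGetD line (k + 1) 0 *
                 PySem.List.pyGetD line (k + 2) 0 * PySem.List.pyGetD line (k + 3) 0 *
                 PySem.List.pyGetD line (k + 4) 0)) best) 0

-- ===== PRECONDITION & SPEC =====
-- Pre_ excludes exactly the ragged matrices on which Python A raises IndexError:
-- when len(matrix) ≥ 5, every row must have at least len(matrix) entries.
def Pre_find_largest_product (matrix : List (List Int)) : Prop :=
  matrix.length < 5 ∨ ∀ row ∈ matrix, matrix.length ≤ row.length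
instance (matrix : List (List Int)) : Decidable (Pre_find_largest_product matrix) := by
  unfold Pre_find_largest_product; infer_instance

def pvWitness_find_largest_product : List (List Int) :=
  [[1, 2, 3, 4, 5], [5, 4, 3, 2, 1], [1, 1, 1, 1, 1], [2, 0, -2, 0, 2], [3, 1, 4, 1, 5]]

def Spec_find_largest_product (matrix : List (List Int)) (out : Int) : Prop := out = find_largest_product_alt matrix
instance (matrix : List (List Int)) (out : Int) : Decidable (Spec_find_largest_product matrix out) := by unfold Spec_find_largest_product; infer_instance

-- ===== CLAIM (what is proved, stated in full; the proofs are below) =====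
def Claim_equal_find_largest_product : Prop := ∀ (matrix : List (List Int)), Dom_find_largest_product matrix → Pre_find_largest_product matrix → Spec_find_largest_product matrix (find_largest_product matrix)

-- ===== LEMMAS AND PROOFS =====

/-- Cell access of the grid, totalized the way both ports write it. -/
def pvG (m : List (List Int)) (i j : Int) : Int :=
  PySem.List.pyGetD (PySem.List.pyGetD m i []) j 0

def pvPR (m : List (List Int)) (i j : Int) : Int :=
  pvG m i j * pvG m i (j + 1) * pvG m i (j + 2) * pvG m i (j + 3) * pvG m i (j + 4)
def pvPC (m : List (List Int)) (i j : Int) : Int :=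
  pvG m i j * pvG m (i + 1) j * pvG m (i + 2) j * pvG m (i + 3) j * pvG m (i + 4) j
def pvPD (m : List (List Int)) (i j : Int) : Int :=
  pvG m i j * pvG m (i + 1) (j + 1) * pvG m (i + 2) (j + 2) * pvG m (i + 3) (j + 3) * pvG m (i + 4) (j + 4)

/-- All window products considered by A, as one flat list. -/
def pvLA (m : List (List Int)) : List Int :=
  ((PySem.List.pyRange 0 (m.length : Int) 1).flatMap fun i =>
    (PySem.List.pyRange 0 ((m.length : Int) - 4) 1).map fun j => pvPR m i j) ++
  ((PySem.List.pyRange 0 ((m.length : Int) - 4) 1).flatMap fun i =>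
    (PySem.List.pyRange 0 (m.length : Int) 1).map fun j => pvPC m i j) ++
  ((PySem.List.pyRange 0 ((m.length : Int) - 4) 1).flatMap fun i =>
    (PySem.List.pyRange 0 ((m.length : Int) - 4) 1).map fun j => pvPD m i j)

def pvWin (line : List Int) (k : Int) : Int :=
  PySem.List.pyGetD line k 0 * PySem.List.pyGetD line (k + 1) 0 *
  PySem.List.pyGetD line (k + 2) 0 * PySem.List.pyGetD line (k + 3) 0 *
  PySem.List.pyGetD line (k + 4) 0

def pvLines (m : List (List Int)) : List (List Int) :=
  ((PySem.List.pyRange 0 (m.length : Int) 1).map fun i =>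
    (PySem.List.pyRange 0 (m.length : Int) 1).map fun j => pvG m i j) ++
  ((PySem.List.pyRange 0 (m.length : Int) 1).map fun j =>
    (PySem.List.pyRange 0 (m.length : Int) 1).map fun i => pvG m i j) ++
  ((PySem.List.pyRange 0 (m.length : Int) 1).map fun d =>
    (PySem.List.pyRange d (m.length : Int) 1).map fun i => pvG m i (i - d)) ++
  ((PySem.List.pyRange 1 (m.length : Int) 1).map fun d =>
    (PySem.List.pyRange d (m.length : Int) 1).map fun j => pvG m (j - d) j)

/-- All window products considered by B, as one flat list. -/
def pvLB (m : List (List Int)) : List Int :=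
  (pvLines m).flatMap fun line =>
    (PySem.List.pyRange 0 ((line.length : Int) - 4) 1).map fun k => pvWin line k

theorem pvLoopF {α : Type} (l : List α) (R : α → List Int) (f : α → Int → Int) (s : Int) :
    l.foldl (fun acc x => (R x).foldl (fun a j => max a (f x j)) acc) s
      = (l.flatMap fun x => (R x).map (f x)).foldl max s := by
  induction l generalizing s with
  | nil => rfl
  | cons h t ih => simp [List.flatMap_cons, List.foldl_append, List.foldl_map, ih]

theorem pvFoldlMax_le (L M : List Int) (s : Int) (h : ∀ x ∈ L, x ∈ M) :
    L.foldl max s ≤ M.foldl max s := by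
  rcases PySem.List.foldl_max_mem L s with h1 | h1
  · rw [h1]; exact (PySem.List.le_foldl_max M s).1
  · exact (PySem.List.le_foldl_max M s).2 _ (h _ h1)

theorem pvFoldlMax_eq (L M : List Int) (s : Int)
    (h1 : ∀ x ∈ L, x ∈ M) (h2 : ∀ x ∈ M, x ∈ L) :
    L.foldl max s = M.foldl max s :=
  le_antisymm (pvFoldlMax_le L M s h1) (pvFoldlMax_le M L s h2)

theorem pvGetD_map_range (f : Int → Int) (a b k : Int) (h0 : 0 ≤ k) (h : a + k < b) :
    PySem.List.pyGetD ((PySem.List.pyRange a b 1).map f) k 0 = f (a + k) := by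
  have hk : k = ((k.toNat : Nat) : Int) := (Int.toNat_of_nonneg h0).symm
  rw [hk, PySem.List.pyGetD_map_pyRange_one f a b k.toNat 0 (by omega)]


theorem pvWinval (f : Int → Int) (a b k : Int) (h0 : 0 ≤ k) (h : a + k + 4 < b) :
    pvWin ((PySem.List.pyRange a b 1).map f) k
      = f (a + k) * f (a + (k + 1)) * f (a + (k + 2)) * f (a + (k + 3)) * f (a + (k + 4)) := by
  unfold pvWin
  rw [pvGetD_map_range f a b k h0 (by omega),
      pvGetD_map_range f a b (k + 1) (by omega) (by omega),
      pvGetD_map_range f a b (k + 2) (by omega) (by omega),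
      pvGetD_map_range f a b (k + 3) (by omega) (by omega),
      pvGetD_map_range f a b (k + 4) (by omega) (by omega)]

theorem pvA_eq (m : List (List Int)) : find_largest_product m = (pvLA m).foldl max 0 := by
  unfold find_largest_product pvLA
  dsimp only
  rw [pvLoopF, pvLoopF, pvLoopF, List.foldl_append, List.foldl_append]
  simp only [pvPR, pvPC, pvPD, pvG]

theorem pvB_eq (m : List (List Int)) (h : ¬ (m.length : Int) < 5) :
    find_largest_product_alt m = (pvLB m).foldl max 0 := by
  unfold find_largest_product_alt pvLB pvLines
  dsimp only
  rw [if_neg h, pvLoopF]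
  simp only [pvWin, pvG]

theorem find_largest_product_spec : Claim_equal_find_largest_product := by
  intro matrix _ _
  unfold Spec_find_largest_product
  by_cases h5 : (matrix.length : Int) < 5
  · have hnil : PySem.List.pyRange 0 ((matrix.length : Int) - 4) 1 = [] :=
      PySem.List.pyRange_one_eq_nil (by omega)
    have hA : find_largest_product matrix = 0 := by
      rw [pvA_eq]
      have hLA : pvLA matrix = [] := by simp [pvLA, hnil]
      rw [hLA]; rfl
    have hB : find_largest_product_alt matrix = 0 := by
      unfold find_largest_product_alt
      dsimp only
      rw [if_pos h5]
    rw [hA, hB]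
  · rw [pvA_eq, pvB_eq matrix h5]
    set n : Int := (matrix.length : Int) with hn
    apply pvFoldlMax_eq
    · -- A's products all appear among B's
      intro x hx
      simp only [pvLA, List.mem_append, List.mem_flatMap, List.mem_map,
        PySem.List.mem_pyRange_one] at hx
      simp only [pvLB, pvLines, List.mem_flatMap, List.mem_append, List.mem_map,
        PySem.List.mem_pyRange_one]
      rcases hx with (⟨i, hi, j, hj, hx⟩ | ⟨i, hi, j, hj, hx⟩) | ⟨i, hi, j, hj, hx⟩
      · -- row window (i, j)
        refine ⟨(PySem.List.pyRange 0 n 1).map fun j' => pvG matrix i j', Or.inl (Or.inl (Or.inl ⟨i, hi, rfl⟩)), j, ?_, ?_⟩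
        · simp only [List.length_map, PySem.List.length_pyRange_one]; omega
        · rw [pvWinval _ _ _ _ (by omega) (by omega)]
          simp only [zero_add, ← hx, pvPR]
      · -- column window (i, j): B's column line j, offset i
        refine ⟨(PySem.List.pyRange 0 n 1).map fun i' => pvG matrix i' j, Or.inl (Or.inl (Or.inr ⟨j, hj, rfl⟩)), i, ?_, ?_⟩
        · simp only [List.length_map, PySem.List.length_pyRange_one]; omega
        · rw [pvWinval _ _ _ _ (by omega) (by omega)]
          simp only [zero_add, ← hx, pvPC]
      · -- diagonal window (i, j)
        by_cases hle : j ≤ i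
        · -- below/on the main diagonal: line starting at (i - j, 0), offset j
          refine ⟨(PySem.List.pyRange (i - j) n 1).map fun i' => pvG matrix i' (i' - (i - j)),
            Or.inl (Or.inr ⟨i - j, ⟨by omega, by omega⟩, rfl⟩), j, ?_, ?_⟩
          · simp only [List.length_map, PySem.List.length_pyRange_one]; omega
          · rw [pvWinval _ _ _ _ (by omega) (by omega)]
            simp only [add_sub_cancel_left] 
            simp only [← add_assoc, ← hx, pvPD]
            rw [show i - j + j = i by ring]
        · -- above the main diagonal: line starting at (0, j - i), offset i
          refine ⟨(PySem.List.pyRange (j - i) n 1).map fun j' => pvG matrix (j' - (j - i)) j',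
            Or.inr ⟨j - i, ⟨by omega, by omega⟩, rfl⟩, i, ?_, ?_⟩
          · simp only [List.length_map, PySem.List.length_pyRange_one]; omega
          · rw [pvWinval _ _ _ _ (by omega) (by omega)]
            simp only [add_sub_cancel_left] 
            simp only [← add_assoc, ← hx, pvPD]
            rw [show j - i + i = j by ring]
    · -- B's products all appear among A's
      intro x hx
      simp only [pvLB, pvLines, List.mem_flatMap, List.mem_append, List.mem_map,
        PySem.List.mem_pyRange_one] at hx
      simp only [pvLA, List.mem_append, List.mem_flatMap, List.mem_map,
        PySem.List.mem_pyRange_one]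
      obtain ⟨line, hline, k, hk, hx⟩ := hx
      rcases hline with ((⟨i, hi, rfl⟩ | ⟨j, hj, rfl⟩) | ⟨d, hd, rfl⟩) | ⟨d, hd, rfl⟩
      · -- a row line
        simp only [List.length_map, PySem.List.length_pyRange_one] at hk
        rw [pvWinval _ _ _ _ (by omega) (by omega)] at hx
        simp only [zero_add] at hx
        exact Or.inl (Or.inl ⟨i, hi, k, ⟨by omega, by omega⟩, hx⟩)
      · -- a column line
        simp only [List.length_map, PySem.List.length_pyRange_one] at hk
        rw [pvWinval _ _ _ _ (by omega) (by omega)] at hx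
        simp only [zero_add] at hx
        exact Or.inl (Or.inr ⟨k, ⟨by omega, by omega⟩, j, hj, hx⟩)
      · -- a diagonal starting at (d, 0)
        simp only [List.length_map, PySem.List.length_pyRange_one] at hk
        rw [pvWinval _ _ _ _ (by omega) (by omega)] at hx
        simp only [add_sub_cancel_left] at hx
        simp only [← add_assoc] at hx
        exact Or.inr ⟨d + k, ⟨by omega, by omega⟩, k, ⟨by omega, by omega⟩, hx⟩
      · -- a diagonal starting at (0, d)
        simp only [List.length_map, PySem.List.length_pyRange_one] at hk
        rw [pvWinval _ _ _ _ (by omega) (by omega)] at hx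
        simp only [add_sub_cancel_left] at hx
        simp only [← add_assoc] at hx
        exact Or.inr ⟨k, ⟨by omega, by omega⟩, d + k, ⟨by omega, by omega⟩, hx⟩
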